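-- pv_equiv track=rewrite | github.com/CSU-METEC/MAES | src/GenerateArgDoc.py | formatArgDoc
-- ===== SOURCE A (Python) =====
-- def formatArgDoc(rawText):
--     usage = ["Usage\n-----\n::\n\n"]
--     options = ["Options\n-------\n::\n\n"]
--     partition = False
--     for line in rawText:
--         a = line[0:20]
--         if not partition:
--             if line[0:6] == 'usage:':
--                line = "      "+ line[6:]
--             elif line[0] == '\n':
--                 partition = True
--             usage.append(line)
--         else:
--             if not line == 'optional arguments:\n':
--                 options.append(line)
--
--     cleanText = ["MEETMain\n========\n\n"]+usage+options
--     return cleanText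
-- ===== SOURCE B (Python) =====
-- def formatArgDoc(rawText):
--     # find the boundary: first line starting with '\n' (same IndexError as A on an
--     # empty-string line in the usage region)
--     i = 0
--     while i < len(rawText) and rawText[i][0] != '\n':
--         i += 1
--     usage = ["Usage\n-----\n::\n\n"] + [
--         ("      " + line[6:]) if line[0:6] == 'usage:' else line
--         for line in rawText[:i + 1]
--     ]
--     options = ["Options\n-------\n::\n\n"] + [
--         line for line in rawText[i + 1:] if line != 'optional arguments:\n'
--     ]
--     return ["MEETMain\n========\n\n"] + usage + options
-- ===== Notes on version B (the rewrite author's own statement) =====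
-- stated objective: alternative
-- what changed: Replaces A's single stateful loop with a boolean partition flag by a boundary-index scan followed by independent slice/map (usage) and slice/filter (options) passes.
import Mathlib
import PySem

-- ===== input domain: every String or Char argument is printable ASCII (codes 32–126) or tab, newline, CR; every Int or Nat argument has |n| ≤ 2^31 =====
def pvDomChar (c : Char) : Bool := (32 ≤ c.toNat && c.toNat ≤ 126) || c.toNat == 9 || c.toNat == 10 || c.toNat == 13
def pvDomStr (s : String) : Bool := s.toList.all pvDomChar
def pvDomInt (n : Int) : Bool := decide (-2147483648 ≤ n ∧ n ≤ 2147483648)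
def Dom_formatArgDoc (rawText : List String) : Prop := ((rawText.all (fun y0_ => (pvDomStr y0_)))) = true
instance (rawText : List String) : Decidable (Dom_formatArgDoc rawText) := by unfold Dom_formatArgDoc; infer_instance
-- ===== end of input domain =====

-- B replaces A's one stateful loop (boolean `partition` flag) by a boundary-index scan plus
-- independent map/filter passes over the two slices; same cost, different decomposition.

-- ===== PORT A =====
def pvUsageHdr : String := "Usage\n-----\n::\n\n"
def pvOptionsHdr : String := "Options\n-------\n::\n\n"
def pvMainHdr : String := "MEETMain\n========\n\n"

def formatArgDocLoop : List String → List String → List String → Bool → List String × List String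
  | [], usage, options, _ => (usage, options)
  | line :: rest, usage, options, partition =>
    let _a := PySem.Str.slice line (some 0) (some 20)   -- `a = line[0:20]` (unused in A)
    if partition = false then
      if PySem.Str.slice line (some 0) (some 6) = "usage:" then
        formatArgDocLoop rest (usage ++ ["      " ++ PySem.Str.slice line (some 6) none]) options partition
      else if PySem.Str.pyGet? line 0 = some '\n' then
        formatArgDocLoop rest (usage ++ [line]) options true
      else
        -- pyGet? = none here means line = "" and Python A raises IndexError (outside Pre_)
        formatArgDocLoop rest (usage ++ [line]) options partition
    else
      if ¬ (line = "optional arguments:\n") then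
        formatArgDocLoop rest usage (options ++ [line]) partition
      else
        formatArgDocLoop rest usage options partition

def formatArgDoc (rawText : List String) : List String :=
  let uo := formatArgDocLoop rawText [pvUsageHdr] [pvOptionsHdr] false
  [pvMainHdr] ++ uo.1 ++ uo.2

-- ===== PORT B =====
-- `while i < len(rawText) and rawText[i][0] != '\n': i += 1`
def formatArgDocBoundary : List String → Nat
  | [] => 0
  | line :: rest =>
    match PySem.Str.pyGet? line 0 with
    | none => 0          -- Python B raises IndexError here (line = "", outside Pre_)
    | some c => if c = '\n' then 0 else 1 + formatArgDocBoundary rest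

def pvUsageMap (line : String) : String :=
  if PySem.Str.slice line (some 0) (some 6) = "usage:" then
    "      " ++ PySem.Str.slice line (some 6) none
  else line

def formatArgDoc_alt (rawText : List String) : List String :=
  let i := formatArgDocBoundary rawText
  let usage := pvUsageHdr :: (PySem.List.slice rawText (some 0) (some ((i : Int) + 1))).map pvUsageMap
  let options := pvOptionsHdr ::
    (PySem.List.slice rawText (some ((i : Int) + 1)) none).filter
      (fun line => line ≠ "optional arguments:\n")
  [pvMainHdr] ++ usage ++ options

-- ===== PRECONDITION & SPEC =====
-- Pre_ excludes exactly the inputs on which A raises IndexError: an empty-string line in the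
-- usage region (before the first line starting with '\n'); B raises there too.
def Pre_formatArgDoc (rawText : List String) : Prop :=
  ∀ l ∈ rawText.takeWhile (fun l => !(PySem.Str.pyGet? l 0 == some '\n')), l ≠ ""
instance (rawText : List String) : Decidable (Pre_formatArgDoc rawText) := by
  unfold Pre_formatArgDoc; infer_instance

def pvWitness_formatArgDoc : List String :=
  ["usage: prog [-h]\n", "\n", "optional arguments:\n", "  -h, --help\n"]

def Spec_formatArgDoc (rawText : List String) (out : List String) : Prop := out = formatArgDoc_alt rawText
instance (rawText : List String) (out : List String) : Decidable (Spec_formatArgDoc rawText out) := by unfold Spec_formatArgDoc; infer_instance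

-- ===== CLAIM (what is proved, stated in full; the proofs are below) =====
def Claim_equal_formatArgDoc : Prop := ∀ (rawText : List String), Dom_formatArgDoc rawText → Pre_formatArgDoc rawText → Spec_formatArgDoc rawText (formatArgDoc rawText)

-- ===== LEMMAS AND PROOFS =====

theorem pvEmpty_of_pyGet?_none {l : String} (h : PySem.Str.pyGet? l 0 = none) : l = "" := by
  simp [PySem.Str.pyGet?, PySem.List.pyGet?_eq_none_iff, PySem.Raise.InRange] at h
  exact ((String.empty_eq_iff.mpr) h).symm
theorem pvHead_of_usage {l : String}
    (h : PySem.Str.slice l (some 0) (some 6) = "usage:") :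
    PySem.Str.pyGet? l 0 = some 'u' := by
  have h2 : (PySem.Str.slice l (some 0) (some 6)).toList = "usage:".toList := by rw [h]
  simp [PySem.Str.slice] at h2
  rw [show ((6:Int)) = ((6:Nat):Int) by norm_num, PySem.List.slice_to_natCast] at h2
  have h3 : l.toList[0]? = some 'u' := by
    have := congrArg (fun xs => xs[0]?) h2
    simpa [List.getElem?_take] using this
  simp [PySem.Str.pyGet?, PySem.List.pyGet?_zero]
  exact h3
theorem pvLoopTrue (lines usage options : List String) :
    formatArgDocLoop lines usage options true =
      (usage, options ++ lines.filter (fun l => l ≠ "optional arguments:\n")) := by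
  induction lines generalizing options with
  | nil => simp [formatArgDocLoop]
  | cons line rest ih =>
    by_cases h : line = "optional arguments:\n" <;>
      simp [formatArgDocLoop, h, ih]
theorem pvBoundaryCons (line : String) (rest : List String) :
    formatArgDocBoundary (line :: rest) =
      (match PySem.Str.pyGet? line 0 with
       | none => 0
       | some c => if c = '\n' then 0 else 1 + formatArgDocBoundary rest) := rfl
theorem pvLoopFalse (lines usage options : List String)
    (h : ∀ l ∈ lines.takeWhile (fun l => !(PySem.Str.pyGet? l 0 == some '\n')), l ≠ "") :
    formatArgDocLoop lines usage options false =
      (usage ++ (lines.take (formatArgDocBoundary lines + 1)).map pvUsageMap,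
       options ++ (lines.drop (formatArgDocBoundary lines + 1)).filter
         (fun l => l ≠ "optional arguments:\n")) := by
  induction lines generalizing usage with
  | nil => simp [formatArgDocLoop, formatArgDocBoundary]
  | cons line rest ih =>
    by_cases hu : PySem.Str.slice line (some 0) (some 6) = "usage:"
    · have hg : PySem.Str.pyGet? line 0 = some 'u' := pvHead_of_usage hu
      have hcons : (line :: rest).takeWhile (fun l => !(PySem.Str.pyGet? l 0 == some '\n'))
          = line :: rest.takeWhile (fun l => !(PySem.Str.pyGet? l 0 == some '\n')) :=
        List.takeWhile_cons_of_pos (by rw [hg]; decide)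
      have htw : ∀ l ∈ rest.takeWhile (fun l => !(PySem.Str.pyGet? l 0 == some '\n')), l ≠ "" := by
        intro l hl; exact h l (by rw [hcons]; exact List.mem_cons_of_mem _ hl)
      have hb : formatArgDocBoundary (line :: rest) = 1 + formatArgDocBoundary rest := by
        rw [pvBoundaryCons, hg]; simp
      simp only [formatArgDocLoop, hu]
      rw [ih _ htw, hb]
      rw [Nat.add_comm 1 (formatArgDocBoundary rest), Nat.add_assoc]
      simp [pvUsageMap, hu]
    · cases hg : PySem.Str.pyGet? line 0 with
      | none =>
        exfalso
        have hcons : (line :: rest).takeWhile (fun l => !(PySem.Str.pyGet? l 0 == some '\n'))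
            = line :: rest.takeWhile (fun l => !(PySem.Str.pyGet? l 0 == some '\n')) :=
          List.takeWhile_cons_of_pos (by rw [hg]; decide)
        exact h line (by rw [hcons]; exact List.mem_cons_self) (pvEmpty_of_pyGet?_none hg)
      | some c =>
        by_cases hc : c = '\n'
        · subst hc
          have hb : formatArgDocBoundary (line :: rest) = 0 := by
            rw [pvBoundaryCons, hg]; simp
          simp only [formatArgDocLoop, if_neg hu, hg]
          rw [pvLoopTrue, hb]
          simp [pvUsageMap, hu]
        · have hcons : (line :: rest).takeWhile (fun l => !(PySem.Str.pyGet? l 0 == some '\n'))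
              = line :: rest.takeWhile (fun l => !(PySem.Str.pyGet? l 0 == some '\n')) :=
            List.takeWhile_cons_of_pos (by rw [hg]; simp [hc])
          have htw : ∀ l ∈ rest.takeWhile (fun l => !(PySem.Str.pyGet? l 0 == some '\n')), l ≠ "" := by
            intro l hl; exact h l (by rw [hcons]; exact List.mem_cons_of_mem _ hl)
          have hb : formatArgDocBoundary (line :: rest) = 1 + formatArgDocBoundary rest := by
            rw [pvBoundaryCons, hg]; simp [hc]
          simp only [formatArgDocLoop, if_neg hu, hg]
          rw [if_neg (show ¬((some c : Option Char) = some '\n') by simp [hc]), ih _ htw, hb]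
          rw [Nat.add_comm 1 (formatArgDocBoundary rest), Nat.add_assoc]
          simp [pvUsageMap, hu]

-- ===== VERDICT (by name: the statement is the Claim_ definition above) =====
theorem formatArgDoc_spec : Claim_equal_formatArgDoc := by
  intro rawText _ hpre
  unfold Pre_formatArgDoc at hpre
  unfold Spec_formatArgDoc formatArgDoc formatArgDoc_alt
  have h1 : PySem.List.slice rawText (some 0) (some ((formatArgDocBoundary rawText : Int) + 1))
      = rawText.take (formatArgDocBoundary rawText + 1) := by
    rw [show ((formatArgDocBoundary rawText : Int) + 1)
          = (((formatArgDocBoundary rawText + 1 : Nat)) : Int) by push_cast; ring]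
    rw [PySem.List.slice_zero_start, PySem.List.slice_to_natCast]
  have h2 : PySem.List.slice rawText (some ((formatArgDocBoundary rawText : Int) + 1)) none
      = rawText.drop (formatArgDocBoundary rawText + 1) := by
    rw [show ((formatArgDocBoundary rawText : Int) + 1)
          = (((formatArgDocBoundary rawText + 1 : Nat)) : Int) by push_cast; ring]
    rw [PySem.List.slice_from_natCast]
  rw [pvLoopFalse _ _ _ hpre]
  simp [h1, h2]
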